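-- pv_equiv track=rewrite | github.com/Rafael-Arenas/App-AKGroup | src/backend/models/base/validators.py | format
-- ===== SOURCE A (Python) =====
-- from typing import Optional
--
-- def format(value: Optional[str]) -> Optional[str]:
--     """
--     Formatea un RUT válido con puntos y guión.
--
--     Args:
--         value: RUT válido (debe pasar validate primero)
--
--     Returns:
--         RUT formateado: 12.345.678-9
--
--     Example:
--         >>> RutValidator.format("12345678-5")
--         '12.345.678-5'
--     """
--     if not value:
--         return value
--
--     # Separar número y dígito
--     parts = value.split("-")
--     if len(parts) != 2:
--         return value
--
--     number, check = parts
--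
--     # Añadir puntos cada 3 dígitos (de derecha a izquierda)
--     formatted = ""
--     for i, digit in enumerate(reversed(number)):
--         if i > 0 and i % 3 == 0:
--             formatted = "." + formatted
--         formatted = digit + formatted
--
--     return f"{formatted}-{check}"
-- ===== SOURCE B (Python) =====
-- from typing import Optional
--
--
-- def format(value: Optional[str]) -> Optional[str]:
--     if not value:
--         return value
--
--     parts = value.split("-")
--     if len(parts) != 2:
--         return value
--
--     number, check = parts
--
--     # Chunk the reversed number into groups of three, restore each group's
--     # order, and join the groups (rightmost group last) with dots.
--     rev = number[::-1]
--     groups = [rev[i:i + 3][::-1] for i in range(0, len(rev), 3)]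
--     formatted = ".".join(reversed(groups))
--     return f"{formatted}-{check}"
-- ===== Notes on version B (the rewrite author's own statement) =====
-- stated objective: alternative
-- what changed: The per-digit accumulation loop (prepending a dot every third enumerated digit of the reversed number) is replaced by slicing the reversed number into fixed 3-character chunks with a stepped-range comprehension, un-reversing each chunk and dot-joining the chunks in reverse order.
import Mathlib
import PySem

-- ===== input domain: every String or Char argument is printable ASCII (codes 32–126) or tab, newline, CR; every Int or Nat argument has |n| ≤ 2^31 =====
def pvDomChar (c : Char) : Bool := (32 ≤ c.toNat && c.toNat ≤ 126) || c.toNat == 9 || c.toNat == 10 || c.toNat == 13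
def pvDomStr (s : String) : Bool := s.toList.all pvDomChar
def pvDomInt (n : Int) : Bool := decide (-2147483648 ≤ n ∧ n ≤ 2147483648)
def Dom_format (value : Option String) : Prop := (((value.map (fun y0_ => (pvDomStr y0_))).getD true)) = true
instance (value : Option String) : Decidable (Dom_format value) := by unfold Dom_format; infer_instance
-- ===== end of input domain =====

-- B replaces A's per-digit dot-prepending loop by a comprehension that slices the
-- reversed number into 3-character chunks and joins the un-reversed chunks with dots.

-- ===== PORT A =====
def format (value : Option String) : Option String :=
  match value with
  | none => none                                   -- `if not value: return value`
  | some s =>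
    if s.toList = [] then some s                   -- empty string is falsy
    else
      match PySem.Chars.splitOn s.toList ['-'] with  -- value.split("-")
      | [number, check] =>                         -- len(parts) == 2, then unpack
        -- for i, digit in enumerate(reversed(number)): prepend '.' then the digit
        let formatted := (PySem.List.enumerate number.reverse 0).foldl
          (fun F p =>
            let F := if 0 < p.1 ∧ p.1 % 3 = 0 then '.' :: F else F
            p.2 :: F) []
        some (String.ofList (formatted ++ ['-'] ++ check))
      | _ => some s                                -- len(parts) != 2

-- ===== PORT B =====
def format_alt (value : Option String) : Option String :=
  match value with
  | some s =>
    if s.toList = [] then some s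
    else
      match PySem.Chars.splitOn s.toList ['-'] with
      | [] => some s
      | [_] => some s
      | _ :: _ :: _ :: _ => some s
      | [number, check] =>
        let rev := (PySem.List.slice? number none none (-1)).getD []   -- number[::-1]
        let groups := (PySem.List.pyRange 0 (PySem.Chars.len rev) 3).map
          (fun i => (PySem.List.slice? (PySem.List.slice rev (some i) (some (i + 3)))
              none none (-1)).getD [])             -- rev[i:i+3][::-1]
        let formatted := PySem.Chars.join ['.'] groups.reverse         -- ".".join(reversed(groups))
        some (String.ofList (formatted ++ ['-'] ++ check))
  | none => none

-- ===== PRECONDITION & SPEC =====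
def Spec_format (value : Option String) (out : Option String) : Prop := out = format_alt value
instance (value : Option String) (out : Option String) : Decidable (Spec_format value out) := by unfold Spec_format; infer_instance

-- ===== CLAIM (what is proved, stated in full; the proofs are below) =====
def Claim_equal_format : Prop := ∀ (value : Option String), Dom_format value → Spec_format value (format value)

-- ===== LEMMAS AND PROOFS =====

-- the common recursive description of the formatted number: groups of three, right-to-left
def chunkRec (r : List Char) : List Char :=
  if _h : r.length ≤ 3 then r.reverse
  else chunkRec (r.drop 3) ++ '.' :: (r.take 3).reverse
termination_by r.length
decreasing_by simp; omega

-- ---- A's loop ----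
def stepA (F : List Char) (p : Int × Char) : List Char :=
  let F := if 0 < p.1 ∧ p.1 % 3 = 0 then '.' :: F else F
  p.2 :: F

def loopA (i : Int) (r : List Char) (F : List Char) : List Char :=
  (PySem.List.enumerate r i).foldl stepA F

theorem loopA_nil (i : Int) (F : List Char) : loopA i [] F = F := rfl

theorem loopA_cons (i : Int) (d : Char) (t F : List Char) :
    loopA i (d :: t) F = loopA (i + 1) t (stepA F (i, d)) := by
  simp [loopA, PySem.List.enumerate_cons]

theorem loopA_prepend (r : List Char) (i : Int) (F : List Char) :
    loopA i r F = loopA i r [] ++ F := by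
  induction r generalizing i F with
  | nil => simp [loopA_nil]
  | cons d t ih =>
    rw [loopA_cons, loopA_cons]
    simp only [stepA]
    by_cases h : 0 < i ∧ i % 3 = 0
    · rw [if_pos h, if_pos h, ih (i + 1) (d :: '.' :: F), ih (i + 1) [d, '.']]
      simp
    · rw [if_neg h, if_neg h, ih (i + 1) (d :: F), ih (i + 1) [d]]
      simp

theorem loopA_period (t : List Char) (i : Int) (hi : 0 < i) :
    loopA (i + 3) t [] = loopA i t [] := by
  induction t generalizing i with
  | nil => rfl
  | cons d t ih =>
    rw [loopA_cons, loopA_cons]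
    simp only [stepA,
      show (0 < i + 3 ∧ (i + 3) % 3 = 0) ↔ (0 < i ∧ i % 3 = 0) from by omega]
    by_cases h : 0 < i ∧ i % 3 = 0
    · rw [if_pos h, loopA_prepend t (i + 3 + 1), loopA_prepend t (i + 1),
        show i + 3 + 1 = i + 1 + 3 by ring, ih (i + 1) (by omega)]
    · rw [if_neg h, loopA_prepend t (i + 3 + 1), loopA_prepend t (i + 1),
        show i + 3 + 1 = i + 1 + 3 by ring, ih (i + 1) (by omega)]

theorem loopA_eq_chunkRec (r : List Char) : loopA 0 r [] = chunkRec r := by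
  induction hn : r.length using Nat.strong_induction_on generalizing r with
  | _ n ih =>
    match r with
    | [] => rw [chunkRec]; simp [loopA_nil]
    | [a] => rw [chunkRec]; rw [loopA_cons]; simp [loopA, stepA]
    | [a, b] => rw [chunkRec]; rw [loopA_cons, loopA_cons]; simp [loopA, stepA]
    | [a, b, c] => rw [chunkRec]; rw [loopA_cons, loopA_cons, loopA_cons]; simp [loopA, stepA]
    | a :: b :: c :: d :: t =>
      have h4 : ¬ (a :: b :: c :: d :: t).length ≤ 3 := by simp
      rw [chunkRec, dif_neg h4]
      have e1 : loopA 0 (a :: b :: c :: d :: t) [] = loopA 3 (d :: t) [c, b, a] := by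
        simp [loopA_cons, stepA]
      have e2 : loopA 3 (d :: t) [c, b, a] = loopA 3 (d :: t) [] ++ [c, b, a] :=
        loopA_prepend _ 3 _
      have e3 : loopA 3 (d :: t) [] = loopA 0 (d :: t) [] ++ ['.'] := by
        rw [loopA_cons, loopA_cons]
        simp only [stepA]
        norm_num
        rw [loopA_prepend t 4 [d, '.'], loopA_prepend t 1 [d],
          show (4 : Int) = 1 + 3 by ring, loopA_period t 1 (by omega)]
        simp
      have ihr : loopA 0 (d :: t) [] = chunkRec (d :: t) :=
        ih (d :: t).length (by subst hn; simp) _ rfl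
      rw [e1, e2, e3, ihr]
      simp

-- ---- B's comprehension ----
theorem pyRange3_nil (a b : Int) (h : b ≤ a) : PySem.List.pyRange a b 3 = [] := by
  rw [PySem.List.pyRange_of_pos a b (by norm_num)]
  rw [if_neg (by omega)]
  simp

theorem pyRange3_cons (a b : Int) (h : a < b) :
    PySem.List.pyRange a b 3 = a :: PySem.List.pyRange (a + 3) b 3 := by
  rw [PySem.List.pyRange_of_pos a b (by norm_num), PySem.List.pyRange_of_pos (a + 3) b (by norm_num)]
  by_cases h2 : a + 3 < b
  · rw [if_pos h, if_pos h2]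
    have hc : ((b - a + 3 - 1) / 3).toNat = ((b - (a + 3) + 3 - 1) / 3).toNat + 1 := by omega
    rw [hc, List.range_succ_eq_map]
    simp only [List.map_cons, List.map_map]
    congr 1
    · norm_num
    · apply List.map_congr_left
      intro k _
      simp [Function.comp]
      ring
  · rw [if_pos h, if_neg h2]
    have hc : ((b - a + 3 - 1) / 3).toNat = 1 := by omega
    rw [hc]
    simp

theorem join_append_singleton (sep p : List Char) (xs : List (List Char)) (h : xs ≠ []) :
    PySem.Chars.join sep (xs ++ [p]) = PySem.Chars.join sep xs ++ sep ++ p := by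
  induction xs with
  | nil => exact absurd rfl h
  | cons q t ih =>
    match t with
    | [] => simp [PySem.Chars.join_cons_cons, PySem.Chars.join_singleton]
    | u :: t' =>
      rw [List.cons_append, List.cons_append, PySem.Chars.join_cons_cons,
        ← List.cons_append, ih (by simp), PySem.Chars.join_cons_cons]
      simp

theorem chunkB_main (r : List Char) :
    PySem.Chars.join ['.']
      (((PySem.List.pyRange 0 (r.length : Int) 3).map
        (fun i => (PySem.List.slice r (some i) (some (i + 3))).reverse)).reverse) = chunkRec r := by
  induction hn : r.length using Nat.strong_induction_on generalizing r with
  | _ n ih =>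
    subst hn
    by_cases h0 : r.length = 0
    · rw [chunkRec, dif_pos (by omega)]
      rw [pyRange3_nil 0 (r.length : Int) (by exact_mod_cast h0.le)]
      simp [PySem.Chars.join_nil]
      exact List.length_eq_zero_iff.mp h0
    · by_cases h3 : r.length ≤ 3
      · rw [chunkRec, dif_pos h3]
        rw [pyRange3_cons 0 r.length (by exact_mod_cast Nat.pos_of_ne_zero h0),
          pyRange3_nil (0 + 3) r.length (by exact_mod_cast h3)]
        simp only [List.map_cons, List.map_nil, List.reverse_cons, List.reverse_nil,
          List.nil_append, PySem.Chars.join_singleton]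
        rw [show ((0 : Int) + 3) = ((3 : Nat) : Int) by norm_num,
          show (0 : Int) = ((0 : Nat) : Int) by norm_num,
          PySem.List.slice_natCast]
        simp [List.take_of_length_le h3]
      · -- r.length > 3: peel the first group of three
        rw [chunkRec, dif_neg h3]
        rw [pyRange3_cons 0 r.length (by exact_mod_cast Nat.pos_of_ne_zero h0)]
        have hshift : PySem.List.pyRange (0 + 3) (r.length : Int) 3 =
            (PySem.List.pyRange 0 ((r.drop 3).length : Int) 3).map (· + 3) := by
          rw [PySem.List.pyRange_of_pos 0 ((r.drop 3).length : Int) (by norm_num),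
            PySem.List.pyRange_of_pos (0 + 3) (r.length : Int) (by norm_num)]
          have hlen : (r.drop 3).length = r.length - 3 := by simp
          by_cases hlt : (0 : Int) + 3 < r.length
          · rw [if_pos hlt, if_pos (by rw [hlen]; push_cast [Nat.cast_sub (by omega : 3 ≤ r.length)]; omega)]
            rw [List.map_map]
            congr 1
            · funext k; simp [Function.comp]; ring
            · rw [hlen]; congr 1; push_cast [Nat.cast_sub (by omega : 3 ≤ r.length)]; omega
          · omega
        rw [hshift]
        simp only [List.map_cons, List.map_map]
        have hmap : ∀ i ∈ PySem.List.pyRange 0 ((r.drop 3).length : Int) 3,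
            ((fun i => (PySem.List.slice r (some i) (some (i + 3))).reverse) ∘ (· + 3)) i =
            (fun i => (PySem.List.slice (r.drop 3) (some i) (some (i + 3))).reverse) i := by
          intro i hi
          have hi0 : 0 ≤ i := ((PySem.List.mem_pyRange_iff_of_pos (by norm_num) i).1 hi).1
          simp only [Function.comp]
          rw [PySem.List.slice_toNat r (by omega) (by omega),
            PySem.List.slice_toNat (r.drop 3) hi0 (by omega), List.drop_drop]
          have e1 : (i + 3).toNat = i.toNat + 3 := by omega
          rw [e1]
          have e2 : (i + 3 + 3).toNat - (i.toNat + 3) = 3 := by omega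
          have e3 : i.toNat + 3 - i.toNat = 3 := by omega
          rw [e2, e3, Nat.add_comm 3 i.toNat]
        rw [List.map_congr_left hmap]
        have hne : (PySem.List.pyRange 0 ((r.drop 3).length : Int) 3).map
            (fun i => (PySem.List.slice (r.drop 3) (some i) (some (i + 3))).reverse) ≠ [] := by
          rw [pyRange3_cons 0 _ (by simp; push_cast; omega)]
          simp
        rw [List.reverse_cons, join_append_singleton _ _ _ (by simpa using hne)]
        rw [ih (r.drop 3).length (by simp; omega) (r.drop 3) rfl]
        rw [show ((0 : Int) + 3) = ((3 : Nat) : Int) by norm_num,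
          show (0 : Int) = ((0 : Nat) : Int) by norm_num,
          PySem.List.slice_natCast]
        simp

-- ===== VERDICT (by name: the statement is the Claim_ definition above) =====
theorem format_spec : Claim_equal_format := by
  intro value _
  unfold Spec_format format format_alt
  match value with
  | none => rfl
  | some s =>
    simp only
    by_cases hs : s.toList = []
    · simp [hs]
    · simp only [hs, if_false]
      rcases hp : PySem.Chars.splitOn s.toList ['-'] with _ | ⟨number, _ | ⟨check, _ | _⟩⟩ <;>
        simp only
      have hA : (PySem.List.enumerate number.reverse 0).foldl
          (fun F p => p.2 :: if 0 < p.1 ∧ p.1 % 3 = 0 then '.' :: F else F) [] =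
          chunkRec number.reverse := loopA_eq_chunkRec number.reverse
      simp only [PySem.List.slice?_none_none_neg_one, Option.getD_some, PySem.Chars.len_eq]
      rw [chunkB_main number.reverse, hA]
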